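-- pv_equiv track=rewrite | github.com/pownby/advent-of-code-2024 | day10/main1.py | get_peaks
-- ===== SOURCE A (Python) =====
-- ROW_OFFSETS = [-1, 0, 1, 0]
--
-- COL_OFFSETS = [0, 1, 0, -1]
--
-- def get_dimensions(grid):
--   row_count = len(grid)
--   col_count = len(grid[0])
--   return row_count, col_count
--
-- def is_valid(row, col, grid):
--   row_count, col_count = get_dimensions(grid)
--   return (row > -1 and row < row_count and col > -1 and col < col_count)
--
-- def get_peaks(row, col, grid, height, found_peaks):
--   if (height == 9):
--     found_peaks.add((row, col))
--   else:
--     for i in range(4):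
--       next_row = row + ROW_OFFSETS[i]
--       next_col = col + COL_OFFSETS[i]
--       if (is_valid(next_row, next_col, grid)):
--         next_height = grid[next_row][next_col]
--         if (next_height == height + 1):
--           get_peaks(next_row, next_col, grid, next_height, found_peaks)
--   return found_peaks
-- ===== SOURCE B (Python) =====
-- # Iterative re-implementation: explicit worklist stack instead of recursion.
-- # Like A, it mutates found_peaks in place (set.add) and returns it.
-- def get_peaks(row, col, grid, height, found_peaks):
--     work = [(row, col, height)]
--     while work:
--         r, c, h = work.pop()
--         if h == 9:
--             found_peaks.add((r, c))
--         else: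
--             row_count = len(grid)
--             col_count = len(grid[0])
--             # pushed in reverse so the pop order matches A's direction order
--             for dr, dc in ((0, -1), (1, 0), (0, 1), (-1, 0)):
--                 nr, nc = r + dr, c + dc
--                 if -1 < nr < row_count and -1 < nc < col_count and grid[nr][nc] == h + 1:
--                     work.append((nr, nc, h + 1))
--     return found_peaks
-- ===== Notes on version B (the rewrite author's own statement) =====
-- stated objective: alternative
-- what changed: replaces the 4-way recursion by an iterative explicit worklist stack (pop a cell, push its matching neighbours in reverse), same traversal order and same in-place mutation of found_peaks
-- outside the precondition, e.g. on get_peaks(0, 0, [[0, 0], [9]], 5, set()): A returns set(), B returns set()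
import Mathlib
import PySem

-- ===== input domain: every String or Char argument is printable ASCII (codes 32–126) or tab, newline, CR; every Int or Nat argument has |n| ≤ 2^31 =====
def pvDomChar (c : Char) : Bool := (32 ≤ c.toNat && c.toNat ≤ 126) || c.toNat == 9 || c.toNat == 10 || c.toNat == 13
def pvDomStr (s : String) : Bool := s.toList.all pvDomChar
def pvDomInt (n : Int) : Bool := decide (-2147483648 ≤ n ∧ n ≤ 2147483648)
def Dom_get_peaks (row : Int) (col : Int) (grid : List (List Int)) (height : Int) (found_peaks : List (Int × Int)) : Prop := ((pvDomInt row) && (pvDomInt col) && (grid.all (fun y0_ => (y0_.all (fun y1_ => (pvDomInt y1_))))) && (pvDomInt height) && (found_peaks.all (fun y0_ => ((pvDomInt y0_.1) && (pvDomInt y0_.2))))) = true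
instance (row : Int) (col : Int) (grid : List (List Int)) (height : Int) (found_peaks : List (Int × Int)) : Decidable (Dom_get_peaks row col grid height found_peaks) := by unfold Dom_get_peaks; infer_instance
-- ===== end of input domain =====

-- B replaces A's recursion by an iterative explicit worklist stack with the same traversal
-- order; both A and B mutate found_peaks (set.add) in place and return it — the equivalence
-- proved here is about the returned value of the PySem.Set model.

-- Shared helpers needed by both ports' termination measures (cited by decreasing_by).
-- pvVal grid r c = grid[r][c] via PySem.pyGet?; the 0 / [] defaults are never reached on
-- inputs admitted by Pre_get_peaks (rectangular non-empty grid, and the guarded indices).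
def pvVal (grid : List (List Int)) (r c : Int) : Int :=
  (PySem.List.pyGet? ((PySem.List.pyGet? grid r).getD []) c).getD 0

def pvGMax (grid : List (List Int)) : Int := grid.flatten.foldl max 0

theorem pvGMax_nonneg (grid : List (List Int)) : 0 ≤ pvGMax grid :=
  (PySem.List.le_foldl_max grid.flatten 0).1

theorem pvVal_le_gMax (grid : List (List Int)) (r c : Int) : pvVal grid r c ≤ pvGMax grid := by
  unfold pvVal
  cases h2 : PySem.List.pyGet? ((PySem.List.pyGet? grid r).getD []) c with
  | none => simpa using pvGMax_nonneg grid
  | some v =>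
    simp only [Option.getD_some]
    have hv : v ∈ (PySem.List.pyGet? grid r).getD [] := PySem.List.mem_of_pyGet?_eq_some _ h2
    cases h1 : PySem.List.pyGet? grid r with
    | none => rw [h1] at hv; simp at hv
    | some rowl =>
      rw [h1] at hv
      have hmem : v ∈ grid.flatten :=
        List.mem_flatten.mpr ⟨rowl, PySem.List.mem_of_pyGet?_eq_some _ h1, hv⟩
      exact (PySem.List.le_foldl_max grid.flatten 0).2 v hmem

-- ===== PORT A =====
def ROW_OFFSETS : List Int := [-1, 0, 1, 0]

def COL_OFFSETS : List Int := [0, 1, 0, -1]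

-- grid[0] raises IndexError on an empty grid in Python; the [] default here is exact on
-- the grids admitted by Pre_get_peaks.
def get_dimensions (grid : List (List Int)) : Int × Int :=
  ((grid.length : Int), (((PySem.List.pyGet? grid 0).getD []).length : Int))

def is_valid (row : Int) (col : Int) (grid : List (List Int)) : Bool :=
  decide (row > -1 ∧ row < (get_dimensions grid).1 ∧ col > -1 ∧ col < (get_dimensions grid).2)

mutual
def get_peaks (row : Int) (col : Int) (grid : List (List Int)) (height : Int) (found_peaks : List (Int × Int)) : List (Int × Int) :=
  if height = 9 then PySem.Set.add found_peaks (row, col)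
  else get_peaks_go row col grid height found_peaks (PySem.List.pyRange 0 4 1)
termination_by ((pvGMax grid + 10 - height).toNat, 5)
decreasing_by exact Prod.Lex.right _ (by decide)

-- the body of A's 'for i in range(4)' loop, recursing on the remaining indices
def get_peaks_go (row : Int) (col : Int) (grid : List (List Int)) (height : Int) (found_peaks : List (Int × Int)) (rem : List Int) : List (Int × Int) :=
  match rem with
  | [] => found_peaks
  | i :: rest =>
    -- next_row = row + ROW_OFFSETS[i], next_col = col + COL_OFFSETS[i],
    -- next_height = grid[next_row][next_col] (written as pvVal), all inlined so the
    -- termination argument can cite pvVal_le_gMax on the same expressions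
    let fp' :=
      if is_valid (row + (PySem.List.pyGet? ROW_OFFSETS i).getD 0) (col + (PySem.List.pyGet? COL_OFFSETS i).getD 0) grid then
        if hh : pvVal grid (row + (PySem.List.pyGet? ROW_OFFSETS i).getD 0) (col + (PySem.List.pyGet? COL_OFFSETS i).getD 0) = height + 1 then
          get_peaks (row + (PySem.List.pyGet? ROW_OFFSETS i).getD 0) (col + (PySem.List.pyGet? COL_OFFSETS i).getD 0) grid
            (pvVal grid (row + (PySem.List.pyGet? ROW_OFFSETS i).getD 0) (col + (PySem.List.pyGet? COL_OFFSETS i).getD 0)) found_peaks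
        else found_peaks
      else found_peaks
    get_peaks_go row col grid height fp' rest
termination_by ((pvGMax grid + 10 - height).toNat, rem.length)
decreasing_by
  · exact Prod.Lex.left _ _ (by
      have := pvVal_le_gMax grid (row + (PySem.List.pyGet? ROW_OFFSETS i).getD 0)
        (col + (PySem.List.pyGet? COL_OFFSETS i).getD 0)
      omega)
  · exact Prod.Lex.right _ (by simp)
end

-- ===== PORT B =====
-- Python B pushes the reversed direction list and pops from the end of the list, so the
-- worklist is modelled top-at-head and the processing order is A's direction order.
def pvDirs : List (Int × Int) := [(-1, 0), (0, 1), (1, 0), (0, -1)]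

def pvInb (grid : List (List Int)) (nr nc : Int) : Bool :=
  decide (-1 < nr ∧ nr < (grid.length : Int) ∧ -1 < nc ∧ nc < (((PySem.List.pyGet? grid 0).getD []).length : Int))

def pvAltNbrs (grid : List (List Int)) (r c h : Int) : List (Int × Int × Int) :=
  pvDirs.filterMap (fun d =>
    if pvInb grid (r + d.1) (c + d.2) && (pvVal grid (r + d.1) (c + d.2) == h + 1)
    then some (r + d.1, c + d.2, h + 1) else none)

def pvS (grid : List (List Int)) (work : List (Int × Int × Int)) : Nat :=
  (work.map (fun e => 5 ^ ((pvGMax grid + 10 - e.2.2).toNat))).sum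

theorem pvAltNbrs_spec (grid : List (List Int)) (r c h : Int) (e : Int × Int × Int)
    (he : e ∈ pvAltNbrs grid r c h) : e.2.2 = h + 1 ∧ pvVal grid e.1 e.2.1 = h + 1 := by
  rcases List.mem_filterMap.mp he with ⟨d, _, hd⟩
  by_cases hc : (pvInb grid (r + d.1) (c + d.2) && (pvVal grid (r + d.1) (c + d.2) == h + 1)) = true
  · rw [if_pos hc] at hd
    obtain ⟨hb⟩ := hd
    rcases Bool.and_eq_true_iff.mp hc with ⟨_, hv⟩
    constructor
    · simp
    · simpa using (beq_iff_eq.mp hv)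
  · rw [if_neg hc] at hd; cases hd

theorem pvAltNbrs_len (grid : List (List Int)) (r c h : Int) :
    (pvAltNbrs grid r c h).length ≤ 4 := by
  have := List.length_filterMap_le (fun d =>
    if pvInb grid (r + d.1) (c + d.2) && (pvVal grid (r + d.1) (c + d.2) == h + 1)
    then some (r + d.1, c + d.2, h + 1) else none) pvDirs
  simpa [pvAltNbrs, pvDirs] using this

theorem pvS_append (grid : List (List Int)) (l₁ l₂ : List (Int × Int × Int)) :
    pvS grid (l₁ ++ l₂) = pvS grid l₁ + pvS grid l₂ := by
  simp [pvS]

theorem pvS_step (grid : List (List Int)) (r c h : Int) (rest : List (Int × Int × Int)) :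
    pvS grid (pvAltNbrs grid r c h ++ rest) < pvS grid ((r, c, h) :: rest) := by
  have hlt : pvS grid (pvAltNbrs grid r c h) < 5 ^ ((pvGMax grid + 10 - h).toNat) := by
    rcases hcase : pvAltNbrs grid r c h with _ | ⟨e, l⟩
    · simp only [pvS, List.map_nil, List.sum_nil]
      exact Nat.pow_pos (by norm_num : (0:Nat) < 5)
    · have hmem : e ∈ pvAltNbrs grid r c h := by rw [hcase]; exact List.mem_cons_self
      have hle : h + 1 ≤ pvGMax grid :=
        (pvAltNbrs_spec grid r c h e hmem).2 ▸ pvVal_le_gMax grid e.1 e.2.1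
      have hconst : ∀ x ∈ e :: l,
          (5 : Nat) ^ ((pvGMax grid + 10 - x.2.2).toNat) = 5 ^ ((pvGMax grid + 10 - (h + 1)).toNat) := by
        intro x hx
        rw [(pvAltNbrs_spec grid r c h x (hcase ▸ hx)).1]
      have hsum : pvS grid (e :: l) =
          (e :: l).length * 5 ^ ((pvGMax grid + 10 - (h + 1)).toNat) := by
        unfold pvS
        rw [List.map_congr_left hconst, List.map_const', List.sum_replicate, smul_eq_mul]
      have hlen : (e :: l).length ≤ 4 := hcase ▸ pvAltNbrs_len grid r c h
      have hμ : (pvGMax grid + 10 - (h + 1)).toNat + 1 = (pvGMax grid + 10 - h).toNat := by omega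
      have hpos : 0 < (5 : Nat) ^ ((pvGMax grid + 10 - (h + 1)).toNat) := Nat.pow_pos (by norm_num : (0:Nat) < 5)
      rw [hsum, ← hμ, pow_succ]
      have := Nat.mul_le_mul_right (5 ^ ((pvGMax grid + 10 - (h + 1)).toNat)) hlen
      omega
  rw [pvS_append]
  simp only [pvS, List.map_cons, List.sum_cons]
  have h2 : pvS grid (pvAltNbrs grid r c h) = pvS grid (pvAltNbrs grid r c h) := rfl
  unfold pvS at hlt
  omega

def get_peaks_alt_go (grid : List (List Int)) : List (Int × Int × Int) → List (Int × Int) → List (Int × Int)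
  | [], fp => fp
  | (r, c, h) :: rest, fp =>
    if h = 9 then get_peaks_alt_go grid rest (PySem.Set.add fp (r, c))
    else get_peaks_alt_go grid (pvAltNbrs grid r c h ++ rest) fp
termination_by work _ => pvS grid work
decreasing_by
  · simp only [pvS, List.map_cons, List.sum_cons]
    have : 0 < (5 : Nat) ^ ((pvGMax grid + 10 - h).toNat) := Nat.pow_pos (by norm_num : (0:Nat) < 5)
    omega
  · exact pvS_step grid r c h rest

def get_peaks_alt (row : Int) (col : Int) (grid : List (List Int)) (height : Int) (found_peaks : List (Int × Int)) : List (Int × Int) :=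
  get_peaks_alt_go grid [(row, col, height)] found_peaks

-- ===== PRECONDITION & SPEC =====
-- Pre_ excludes empty grids and grids with a row shorter than row 0 (unless height == 9,
-- where A never touches the grid): there Python's grid[0] / grid[next_row][next_col] can
-- raise IndexError; a few such grids on which A happens to return are excluded too.
def Pre_get_peaks (row : Int) (col : Int) (grid : List (List Int)) (height : Int) (found_peaks : List (Int × Int)) : Prop :=
  height = 9 ∨ (grid ≠ [] ∧ ∀ r ∈ grid, grid.headI.length ≤ r.length)
instance (row : Int) (col : Int) (grid : List (List Int)) (height : Int) (found_peaks : List (Int × Int)) : Decidable (Pre_get_peaks row col grid height found_peaks) := by unfold Pre_get_peaks; infer_instance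

def pvWitness_get_peaks : Int × Int × List (List Int) × Int × (List (Int × Int)) :=
  (0, 0, [[0, 1], [1, 2]], 0, [])

def Spec_get_peaks (row : Int) (col : Int) (grid : List (List Int)) (height : Int) (found_peaks : List (Int × Int)) (out : List (Int × Int)) : Prop := out = get_peaks_alt row col grid height found_peaks
instance (row : Int) (col : Int) (grid : List (List Int)) (height : Int) (found_peaks : List (Int × Int)) (out : List (Int × Int)) : Decidable (Spec_get_peaks row col grid height found_peaks out) := by unfold Spec_get_peaks; infer_instance

-- ===== CLAIM (what is proved, stated in full; the proofs are below) =====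
def Claim_equal_get_peaks : Prop := ∀ (row : Int) (col : Int) (grid : List (List Int)) (height : Int) (found_peaks : List (Int × Int)), Dom_get_peaks row col grid height found_peaks → Pre_get_peaks row col grid height found_peaks → Spec_get_peaks row col grid height found_peaks (get_peaks row col grid height found_peaks)

-- ===== LEMMAS AND PROOFS =====

-- one direction step of A's loop equals the conditional push of B
theorem step_eq (grid : List (List Int)) (height : Int) (nr nc : Int) (fp : List (Int × Int)) :
    (if is_valid nr nc grid then
        if pvVal grid nr nc = height + 1 then get_peaks nr nc grid (pvVal grid nr nc) fp else fp
      else fp)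
    = (if pvInb grid nr nc && (pvVal grid nr nc == height + 1)
        then get_peaks nr nc grid (height + 1) fp else fp) := by
  have hiff : (pvInb grid nr nc && (pvVal grid nr nc == height + 1)) = true ↔
      (is_valid nr nc grid = true ∧ pvVal grid nr nc = height + 1) := by
    simp [pvInb, is_valid, get_dimensions, and_assoc]
  by_cases hv : is_valid nr nc grid
  · by_cases hh : pvVal grid nr nc = height + 1
    · rw [if_pos hv, if_pos hh, if_pos (hiff.mpr ⟨hv, hh⟩), hh]
    · rw [if_pos hv, if_neg hh, if_neg (by intro hc; exact hh (hiff.mp hc).2)]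
  · rw [if_neg hv, if_neg (by intro hc; exact hv (hiff.mp hc).1)]

-- foldl over a filterMap whose function is an if-then-some collapses to a guarded foldl
theorem foldl_filterMap_ite {α β γ : Type} (C : α → Bool) (E : α → β) (g : γ → β → γ) :
    ∀ (l : List α) (init : γ),
      (l.filterMap (fun d => if C d then some (E d) else none)).foldl g init
        = l.foldl (fun acc d => if C d then g acc (E d) else acc) init := by
  intro l
  induction l with
  | nil => intro init; rfl
  | cons d l ih => intro init; by_cases hc : C d <;> simp [hc, ih]

-- A's loop over range(4) equals a fold of A over B's filtered neighbour list
theorem goA_eq_fold (grid : List (List Int)) (row col height : Int) (fp : List (Int × Int)) :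
    get_peaks_go row col grid height fp (PySem.List.pyRange 0 4 1) =
      (pvAltNbrs grid row col height).foldl
        (fun acc e => get_peaks e.1 e.2.1 grid e.2.2 acc) fp := by
  have hr : PySem.List.pyRange 0 4 1 = [0, 1, 2, 3] := by decide
  rw [hr, pvAltNbrs,
    foldl_filterMap_ite
      (C := fun d : Int × Int => pvInb grid (row + d.1) (col + d.2) && (pvVal grid (row + d.1) (col + d.2) == height + 1))
      (E := fun d : Int × Int => (row + d.1, col + d.2, height + 1))
      (g := fun acc e => get_peaks e.1 e.2.1 grid e.2.2 acc)]
  simp only [pvDirs, List.foldl_cons, List.foldl_nil]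
  simp only [get_peaks_go]
  have o0r : (PySem.List.pyGet? ROW_OFFSETS 0).getD 0 = -1 := by decide
  have o1r : (PySem.List.pyGet? ROW_OFFSETS 1).getD 0 = 0 := by decide
  have o2r : (PySem.List.pyGet? ROW_OFFSETS 2).getD 0 = 1 := by decide
  have o3r : (PySem.List.pyGet? ROW_OFFSETS 3).getD 0 = 0 := by decide
  have o0c : (PySem.List.pyGet? COL_OFFSETS 0).getD 0 = 0 := by decide
  have o1c : (PySem.List.pyGet? COL_OFFSETS 1).getD 0 = 1 := by decide
  have o2c : (PySem.List.pyGet? COL_OFFSETS 2).getD 0 = 0 := by decide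
  have o3c : (PySem.List.pyGet? COL_OFFSETS 3).getD 0 = -1 := by decide
  rw [o0r, o1r, o2r, o3r, o0c, o1c, o2c, o3c]
  simp only [dite_eq_ite]
  simp only [step_eq]

-- B's worklist loop processes one pushed entry exactly as one recursive call of A
theorem key (grid : List (List Int)) : ∀ (n : Nat) (r c h : Int) (rest : List (Int × Int × Int)) (fp : List (Int × Int)),
    (pvGMax grid + 10 - h).toNat ≤ n →
    get_peaks_alt_go grid ((r, c, h) :: rest) fp =
      get_peaks_alt_go grid rest (get_peaks r c grid h fp) := by
  intro n
  induction n with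
  | zero =>
    intro r c h rest fp hn
    by_cases h9 : h = 9
    · rw [get_peaks_alt_go, if_pos h9, get_peaks, if_pos h9]
    · have hns : pvAltNbrs grid r c h = [] := by
        rcases hcase : pvAltNbrs grid r c h with _ | ⟨e, l⟩
        · rfl
        · exfalso
          have hmem : e ∈ pvAltNbrs grid r c h := by rw [hcase]; exact List.mem_cons_self
          have hle : h + 1 ≤ pvGMax grid :=
            (pvAltNbrs_spec grid r c h e hmem).2 ▸ pvVal_le_gMax grid e.1 e.2.1
          omega
      rw [get_peaks_alt_go, if_neg h9, hns, List.nil_append,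
        get_peaks, if_neg h9, goA_eq_fold, hns, List.foldl_nil]
  | succ m ih =>
    intro r c h rest fp hn
    by_cases h9 : h = 9
    · rw [get_peaks_alt_go, if_pos h9, get_peaks, if_pos h9]
    · rw [get_peaks_alt_go, if_neg h9, get_peaks, if_neg h9, goA_eq_fold]
      -- fold the pushed neighbours through the worklist loop
      have inner : ∀ (l : List (Int × Int × Int)), (∀ e ∈ l, e.2.2 = h + 1 ∧ pvVal grid e.1 e.2.1 = h + 1) →
          ∀ (rest' : List (Int × Int × Int)) (acc : List (Int × Int)),
          get_peaks_alt_go grid (l ++ rest') acc =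
            get_peaks_alt_go grid rest' (l.foldl (fun a e => get_peaks e.1 e.2.1 grid e.2.2 a) acc) := by
        intro l
        induction l with
        | nil => intro _ rest' acc; rfl
        | cons e l' ihl =>
          intro hl rest' acc
          obtain ⟨he2, hev⟩ := hl e (List.mem_cons_self)
          have hle : h + 1 ≤ pvGMax grid := hev ▸ pvVal_le_gMax grid e.1 e.2.1
          have hsmall : (pvGMax grid + 10 - e.2.2).toNat ≤ m := by
            rw [he2]; omega
          obtain ⟨er, ec, eh⟩ := e
          rw [List.cons_append, ih er ec eh (l' ++ rest') acc hsmall,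
            ihl (fun x hx => hl x (List.mem_cons_of_mem _ hx)) rest', List.foldl_cons]
      exact inner (pvAltNbrs grid r c h)
        (fun e he => pvAltNbrs_spec grid r c h e he) rest fp

theorem alt_eq (row col : Int) (grid : List (List Int)) (height : Int) (fp : List (Int × Int)) :
    get_peaks_alt row col grid height fp = get_peaks row col grid height fp := by
  rw [get_peaks_alt, key grid ((pvGMax grid + 10 - height).toNat) row col height [] fp le_rfl,
    get_peaks_alt_go]

-- ===== VERDICT (by name: the statement is the Claim_ definition above) =====
theorem get_peaks_spec : Claim_equal_get_peaks := by
  intro row col grid height found_peaks _ _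
  unfold Spec_get_peaks
  exact (alt_eq row col grid height found_peaks).symm
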